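-- pv_equiv track=rewrite | github.com/MEERAN2314/pynta | unifyt/formatter.py | _unit_to_unicode
-- ===== SOURCE A (Python) =====
-- def _unit_to_unicode(unit_str: str) -> str:
--     """Convert unit string to unicode with superscripts."""
--     # Unicode superscript mapping
--     superscripts = {
--         '0': '⁰', '1': '¹', '2': '²', '3': '³', '4': '⁴',
--         '5': '⁵', '6': '⁶', '7': '⁷', '8': '⁸', '9': '⁹',
--         '-': '⁻', '+': '⁺'
--     }
--
--     result = unit_str
--     # Replace ^X with superscript
--     i = 0
--     while i < len(result):
--         if result[i] == '^':
--             # Find the number after ^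
--             j = i + 1
--             while j < len(result) and (result[j].isdigit() or result[j] in '-+'):
--                 j += 1
--
--             # Convert to superscript
--             power = result[i+1:j]
--             superscript = ''.join(superscripts.get(c, c) for c in power)
--             result = result[:i] + superscript + result[j:]
--             i = i + len(superscript)
--         else:
--             i += 1
--
--     return result
-- ===== SOURCE B (Python) =====
-- def _unit_to_unicode(unit_str: str) -> str:
--     """Convert unit string to unicode with superscripts (split-based)."""
--     superscripts = {
--         '0': '⁰', '1': '¹', '2': '²', '3': '³', '4': '⁴',
--         '5': '⁵', '6': '⁶', '7': '⁷', '8': '⁸', '9': '⁹',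
--         '-': '⁻', '+': '⁺'
--     }
--     segments = unit_str.split('^')
--     out = [segments[0]]
--     for seg in segments[1:]:
--         k = 0
--         while k < len(seg) and (seg[k].isdigit() or seg[k] in '-+'):
--             k += 1
--         out.append(''.join(superscripts.get(c, c) for c in seg[:k]) + seg[k:])
--     return ''.join(out)
-- ===== Notes on version B (the rewrite author's own statement) =====
-- stated objective: faster
-- what changed: Replaces A's in-place index-rescanning while loop (repeated full-string splicing per caret) by a single split('^') followed by a per-segment leading-prefix superscript transform and one join.
import Mathlib
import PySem

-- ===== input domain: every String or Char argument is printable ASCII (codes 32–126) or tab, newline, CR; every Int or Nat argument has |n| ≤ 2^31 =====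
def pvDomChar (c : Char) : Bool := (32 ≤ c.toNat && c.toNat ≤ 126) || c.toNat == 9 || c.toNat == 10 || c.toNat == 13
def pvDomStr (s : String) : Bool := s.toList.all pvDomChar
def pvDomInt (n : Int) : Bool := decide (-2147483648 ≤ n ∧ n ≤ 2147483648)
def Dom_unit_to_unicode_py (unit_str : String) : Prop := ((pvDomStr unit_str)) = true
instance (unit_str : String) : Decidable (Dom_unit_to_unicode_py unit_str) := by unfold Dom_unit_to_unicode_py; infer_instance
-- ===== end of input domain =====

-- B rewrites A's in-place index-rescanning splice loop as split('^') + per-segment prefix transform + join.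

-- ===== PORT A =====
-- superscripts.get(c, c)
def supMap (c : Char) : Char :=
  if c = '0' then '⁰' else if c = '1' then '¹' else if c = '2' then '²'
  else if c = '3' then '³' else if c = '4' then '⁴' else if c = '5' then '⁵'
  else if c = '6' then '⁶' else if c = '7' then '⁷' else if c = '8' then '⁸'
  else if c = '9' then '⁹' else if c = '-' then '⁻' else if c = '+' then '⁺' else c

-- result[j].isdigit() or result[j] in '-+'  (exact on the ASCII characters scanned here)
def isPow (c : Char) : Bool := c.isDigit || c = '-' || c = '+'

-- the while loop: result[i] == '^' → inner scan j (takeWhile/dropWhile), splice, i += len(superscript).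
-- Structural recursion on a fuel counter (initial fuel = length suffices: len(result) - i strictly decreases each step).
def aLoop (fuel : Nat) (cs : List Char) (i : Nat) : List Char :=
  match fuel with
  | 0 => cs
  | fuel + 1 =>
    if h : i < cs.length then
      if cs[i] = '^' then
        let rest := cs.drop (i+1)
        let sup := (rest.takeWhile isPow).map supMap
        aLoop fuel (cs.take i ++ sup ++ rest.dropWhile isPow) (i + sup.length)
      else aLoop fuel cs (i+1)
    else cs

def unit_to_unicode_py (unit_str : String) : String :=
  String.mk (aLoop unit_str.toList.length unit_str.toList 0)

-- ===== PORT B =====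
-- unit_str.split('^') (hand-written, exact Python split semantics for a 1-char separator)
def splitCaret : List Char → List (List Char)
  | [] => [[]]
  | c :: rest =>
    if c = '^' then [] :: splitCaret rest
    else
      match splitCaret rest with
      | s :: ss => (c :: s) :: ss
      | [] => [[c]]

-- one tail segment: map the leading digit/sign run through superscripts, keep the remainder
def bSeg (seg : List Char) : List Char :=
  (seg.takeWhile isPow).map supMap ++ seg.dropWhile isPow

def unit_to_unicode_py_alt (unit_str : String) : String :=
  match splitCaret unit_str.toList with
  | [] => ""
  | s0 :: rest => String.mk (s0 ++ (rest.map bSeg).flatten)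

-- ===== PRECONDITION & SPEC =====
def Spec_unit_to_unicode_py (unit_str : String) (out : String) : Prop := out = unit_to_unicode_py_alt unit_str
instance (unit_str : String) (out : String) : Decidable (Spec_unit_to_unicode_py unit_str out) := by unfold Spec_unit_to_unicode_py; infer_instance

-- ===== CLAIM (what is proved, stated in full; the proofs are below) =====
def Claim_equal_unit_to_unicode_py : Prop := ∀ (unit_str : String), Dom_unit_to_unicode_py unit_str → Spec_unit_to_unicode_py unit_str (unit_to_unicode_py unit_str)

-- ===== LEMMAS AND PROOFS =====

-- reference function: what scanning from the left computes
def fSpec : List Char → List Char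
  | [] => []
  | c :: rest =>
    if c = '^' then (rest.takeWhile isPow).map supMap ++ fSpec (rest.dropWhile isPow)
    else c :: fSpec rest
termination_by cs => cs.length
decreasing_by
  · simpa using Nat.lt_succ_of_le (List.length_dropWhile_le _ _)
  · simp

lemma isPow_caret : isPow '^' = false := by decide

lemma aLoop_eq (fuel : Nat) : ∀ (cs : List Char) (i : Nat), cs.length - i ≤ fuel →
    aLoop fuel cs i = cs.take i ++ fSpec (cs.drop i) := by
  induction fuel with
  | zero =>
    intro cs i hf
    have h' : cs.length ≤ i := by omega
    simp [aLoop, List.take_of_length_le h', List.drop_eq_nil_of_le h', fSpec]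
  | succ fuel ih =>
    intro cs i hf
    rw [aLoop]
    by_cases h : i < cs.length
    · rw [dif_pos h]
      by_cases hc : cs[i] = '^'
      · rw [if_pos hc]
        have hdw : (List.dropWhile isPow (cs.drop (i+1))).length ≤ (cs.drop (i+1)).length :=
          List.length_dropWhile_le _ _
        have hfit : (cs.take i ++ (((cs.drop (i+1)).takeWhile isPow).map supMap)
            ++ (cs.drop (i+1)).dropWhile isPow).length
            - (i + (((cs.drop (i+1)).takeWhile isPow).map supMap).length) ≤ fuel := by
          simp only [List.length_append, List.length_take, List.length_map, List.length_drop] at *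
          omega
        rw [ih _ _ hfit]
        have hlen : (cs.take i ++ ((cs.drop (i+1)).takeWhile isPow).map supMap).length
            = i + (((cs.drop (i+1)).takeWhile isPow).map supMap).length := by
          simp [List.length_take, Nat.min_eq_left (Nat.le_of_lt h)]
        have hdropi : cs.drop i = cs[i] :: cs.drop (i+1) := List.drop_eq_getElem_cons h
        rw [List.append_assoc, ← List.append_assoc (cs.take i)]
        rw [List.take_append_of_le_length (le_of_eq hlen.symm), List.take_of_length_le (le_of_eq hlen)]
        rw [List.drop_append_of_le_length (le_of_eq hlen.symm), List.drop_of_length_le (le_of_eq hlen)]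
        simp only [hdropi, hc, fSpec, if_true, List.append_assoc, List.nil_append]
      · rw [if_neg hc]
        have hfit : cs.length - (i + 1) ≤ fuel := by omega
        rw [ih _ _ hfit]
        have hdropi : cs.drop i = cs[i] :: cs.drop (i+1) := List.drop_eq_getElem_cons h
        rw [hdropi, fSpec, if_neg hc, List.take_add_one, List.getElem?_eq_getElem h,
          Option.toList_some, List.append_assoc, List.singleton_append]
    · rw [dif_neg h]
      have h' : cs.length ≤ i := Nat.le_of_not_lt h
      simp [List.take_of_length_le h', List.drop_eq_nil_of_le h', fSpec]

lemma fSpec_no_caret (cs : List Char) (h : '^' ∉ cs) : fSpec cs = cs := by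
  induction cs with
  | nil => simp [fSpec]
  | cons c rest ih =>
    have hc : c ≠ '^' := fun hh => h (hh ▸ List.mem_cons_self ..)
    rw [fSpec, if_neg hc, ih (fun hm => h (List.mem_cons_of_mem _ hm))]

lemma fSpec_append_no_caret (a b : List Char) (h : '^' ∉ a) :
    fSpec (a ++ b) = a ++ fSpec b := by
  induction a with
  | nil => simp
  | cons c rest ih =>
    have hc : c ≠ '^' := fun hh => h (hh ▸ List.mem_cons_self ..)
    rw [List.cons_append, fSpec, if_neg hc, ih (fun hm => h (List.mem_cons_of_mem _ hm))]
    rfl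

lemma splitCaret_no_caret (cs : List Char) (h : '^' ∉ cs) : splitCaret cs = [cs] := by
  induction cs with
  | nil => simp [splitCaret]
  | cons c rest ih =>
    have hc : c ≠ '^' := fun hh => h (hh ▸ List.mem_cons_self ..)
    rw [splitCaret, if_neg hc, ih (fun hm => h (List.mem_cons_of_mem _ hm))]

lemma splitCaret_append (a b : List Char) (h : '^' ∉ a) :
    splitCaret (a ++ '^' :: b) = a :: splitCaret b := by
  induction a with
  | nil => simp [splitCaret]
  | cons c rest ih =>
    have hc : c ≠ '^' := fun hh => h (hh ▸ List.mem_cons_self ..)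
    rw [List.cons_append, splitCaret, if_neg hc, ih (fun hm => h (List.mem_cons_of_mem _ hm))]

lemma takeWhile_isPow_caret (u b : List Char) :
    (u ++ '^' :: b).takeWhile isPow = u.takeWhile isPow := by
  induction u with
  | nil => simp [List.takeWhile, isPow_caret]
  | cons c rest ih =>
    by_cases hc : isPow c <;> simp [List.takeWhile, hc, ih]

lemma dropWhile_isPow_caret (u b : List Char) :
    (u ++ '^' :: b).dropWhile isPow = u.dropWhile isPow ++ '^' :: b := by
  induction u with
  | nil => simp [List.dropWhile, isPow_caret]
  | cons c rest ih =>
    by_cases hc : isPow c <;> simp [List.dropWhile, hc, ih]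

lemma caret_decomp (b : List Char) (h : '^' ∈ b) :
    ∃ u b', b = u ++ '^' :: b' ∧ '^' ∉ u ∧ b'.length < b.length := by
  induction b with
  | nil => cases h
  | cons c rest ih =>
    by_cases hc : c = '^'
    · exact ⟨[], rest, by simp [hc], by simp, by simp⟩
    · have hr : '^' ∈ rest := by
        rcases List.mem_cons.mp h with h1 | h1
        · exact absurd h1.symm hc
        · exact h1
      obtain ⟨u, b', he, hnu, hl⟩ := ih hr
      exact ⟨c :: u, b', by simp [he], by simp [hnu, Ne.symm hc], by simp [he]; omega⟩

lemma not_caret_dropWhile (u : List Char) (h : '^' ∉ u) : '^' ∉ u.dropWhile isPow :=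
  fun hm => h ((List.dropWhile_sublist _).mem hm)

lemma segJoin (n : Nat) : ∀ b : List Char, b.length ≤ n →
    (b.takeWhile isPow).map supMap ++ fSpec (b.dropWhile isPow)
      = ((splitCaret b).map bSeg).flatten := by
  induction n with
  | zero =>
    intro b hb
    have : b = [] := List.eq_nil_of_length_eq_zero (Nat.le_zero.mp hb)
    subst this
    simp [splitCaret, bSeg, fSpec]
  | succ n ih =>
    intro b hb
    by_cases hc : '^' ∈ b
    · obtain ⟨u, b', he, hnu, hl⟩ := caret_decomp b hc
      subst he
      rw [takeWhile_isPow_caret, dropWhile_isPow_caret,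
        fSpec_append_no_caret _ _ (not_caret_dropWhile u hnu), fSpec, if_pos rfl,
        splitCaret_append _ _ hnu]
      have hb' : b'.length ≤ n := by omega
      rw [List.map_cons, List.flatten_cons, ← ih b' hb', bSeg]
      simp [List.append_assoc]
    · rw [splitCaret_no_caret b hc,
        fSpec_no_caret _ (not_caret_dropWhile b hc)]
      simp [bSeg]

lemma fSpec_eq_split (cs : List Char) :
    fSpec cs = (match splitCaret cs with
      | [] => []
      | s0 :: rest => s0 ++ (rest.map bSeg).flatten) := by
  by_cases hc : '^' ∈ cs
  · obtain ⟨u, b', he, hnu, _⟩ := caret_decomp cs hc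
    subst he
    rw [splitCaret_append _ _ hnu, fSpec_append_no_caret _ _ hnu, fSpec, if_pos rfl,
      segJoin b'.length b' le_rfl]
  · rw [splitCaret_no_caret cs hc, fSpec_no_caret cs hc]
    simp

-- ===== VERDICT (by name: the statement is the Claim_ definition above) =====
theorem unit_to_unicode_py_spec : Claim_equal_unit_to_unicode_py := by
  intro s _
  show unit_to_unicode_py s = unit_to_unicode_py_alt s
  rw [unit_to_unicode_py, unit_to_unicode_py_alt,
    aLoop_eq s.toList.length s.toList 0 (by omega), List.take_zero, List.drop_zero,
    List.nil_append, fSpec_eq_split]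
  cases h : splitCaret s.toList with
  | nil => rfl
  | cons s0 rest => rfl
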